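-- pv_equiv track=rewrite | github.com/0xekez/markov_song_generator | song_markov.py | prep_output
-- ===== SOURCE A (Python) =====
-- def prep_output(output):
--     out = output.strip().replace(" .", ".").split()
--     out[0] = out[0].capitalize()
--     for index in range(len(out)):
--         if (index != 0):
--             if out[index-1][-1] in [".","!","?"]:
--                 caps = out[index].capitalize()
--                 out[index] = caps
--     s = ''
--     for w in out:
--         s += w + ' '
--     out = s.strip()
--     if out[-1] not in [".", ",",":","!","?"]:
--         out += "."
--     return out.replace(' i ', ' I ')
-- ===== SOURCE B (Python) =====
-- def prep_output(output):
--     words = output.strip().replace(" .", ".").split()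
--     # stage 1: group the words into sentences (a sentence ends at a word
--     # whose last character is a terminator)
--     sentences = []
--     current = []
--     for w in words:
--         current.append(w)
--         if w[-1] in ".!?":
--             sentences.append(current)
--             current = []
--     if current:
--         sentences.append(current)
--     # stage 2: capitalize the first word of each sentence, flatten, join
--     fixed = [[sent[0].capitalize()] + sent[1:] for sent in sentences]
--     s = " ".join(w for sent in fixed for w in sent)
--     if s[-1] not in ".,:!?":
--         s += "."
--     return s.replace(" i ", " I ")
-- ===== Notes on version B (the rewrite author's own statement) =====
-- stated objective: alternative
-- what changed: Replaces A's single in-place indexed loop that looks back at out[index-1][-1] to decide capitalization (plus a special-cased first word and manual s += w + ' ' concatenation) with a staged pipeline over a different intermediate structure: words are first grouped into a list of sentences (split after terminator-ending words), then the first word of each sentence is capitalized, and the flattened result is space-joined.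
import Mathlib
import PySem

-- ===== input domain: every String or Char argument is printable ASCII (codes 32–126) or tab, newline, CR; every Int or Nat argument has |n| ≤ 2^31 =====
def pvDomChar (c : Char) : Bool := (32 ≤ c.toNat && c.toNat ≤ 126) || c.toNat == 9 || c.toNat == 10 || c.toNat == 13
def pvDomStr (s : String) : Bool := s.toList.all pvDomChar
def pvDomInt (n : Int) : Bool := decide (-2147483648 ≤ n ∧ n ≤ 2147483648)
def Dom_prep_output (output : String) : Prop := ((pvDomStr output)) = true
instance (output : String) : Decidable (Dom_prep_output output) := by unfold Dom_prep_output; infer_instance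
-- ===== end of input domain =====

-- B replaces A's single in-place indexed loop (look-back at out[index-1][-1], special-cased first
-- word, manual `s += w + ' '` concatenation) by a staged pipeline over a different intermediate
-- structure: group the words into sentences, capitalize each sentence's first word, flatten, join
-- (objective: alternative).

-- ===== PORT A =====
-- Python str.capitalize(): first char uppercased, rest lowercased (exact on the ASCII domain).
def pyCapitalize (cs : List Char) : List Char :=
  match cs with
  | [] => []
  | c :: rest => PySem.Chars.upperChar c :: PySem.Chars.lower rest

-- Python `w[-1] in <collection of 1-char strings>`: membership of the last character
-- (false where Python would raise on w = ""; unreachable under Pre_).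
def pvLastIn (w : List Char) (cs : List Char) : Bool :=
  match PySem.List.pyGet? w (-1) with
  | some c => cs.contains c
  | none => false

def prep_output (output : String) : String :=
  let out0 := PySem.Chars.split₀ (PySem.Chars.replace (PySem.Chars.strip output.toList) [' ', '.'] ['.'])
  match out0 with
  | [] => ""   -- Python raises IndexError at out[0]; excluded by Pre_
  | w0 :: ws =>
    let out1 := pyCapitalize w0 :: ws
    let out2 := (PySem.List.pyRange 0 (PySem.List.len out1) 1).foldl
      (fun acc index =>
        if index ≠ 0 then
          if pvLastIn (PySem.List.pyGetD acc (index - 1) []) ['.', '!', '?'] then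
            PySem.List.pySetD acc index (pyCapitalize (PySem.List.pyGetD acc index []))
          else acc
        else acc) out1
    let s := out2.foldl (fun s w => s ++ w ++ [' ']) []
    let out3 := PySem.Chars.strip s
    let out4 := if pvLastIn out3 ['.', ',', ':', '!', '?'] then out3 else out3 ++ ['.']
    String.ofList (PySem.Chars.replace out4 [' ', 'i', ' '] [' ', 'I', ' '])

-- ===== PORT B =====
-- `[sent[0].capitalize()] + sent[1:]`; the [] case is unreachable (B's groups are nonempty).
def capFirstSent (sent : List (List Char)) : List (List Char) :=
  match sent with
  | [] => []
  | h :: t => pyCapitalize h :: t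

def prep_output_alt (output : String) : String :=
  let words := PySem.Chars.split₀ (PySem.Chars.replace (PySem.Chars.strip output.toList) [' ', '.'] ['.'])
  -- stage 1: group the words into sentences
  let st := words.foldl
    (fun (st : List (List (List Char)) × List (List Char)) w =>
      let cur := st.2 ++ [w]
      if pvLastIn w ['.', '!', '?'] then (st.1 ++ [cur], []) else (st.1, cur))
    ([], [])
  let sentences := if st.2.isEmpty then st.1 else st.1 ++ [st.2]
  -- stage 2: capitalize the first word of each sentence, flatten, join
  let fixed := sentences.map capFirstSent
  let s := PySem.Chars.join [' '] (fixed.flatMap id)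
  let s2 := if pvLastIn s ['.', ',', ':', '!', '?'] then s else s ++ ['.']
  String.ofList (PySem.Chars.replace s2 [' ', 'i', ' '] [' ', 'I', ' '])

-- ===== PRECONDITION & SPEC =====
-- Pre_: the input contains a non-whitespace character; on all-whitespace input the Python A
-- raises IndexError (at out[0]), as does B (at s[-1]).
def Pre_prep_output (output : String) : Prop :=
  (output.toList.any (fun c => !PySem.Chars.isspace c)) = true
instance (output : String) : Decidable (Pre_prep_output output) := by
  unfold Pre_prep_output; infer_instance

def pvWitness_prep_output : String := "hi there"

def Spec_prep_output (output : String) (out : String) : Prop := out = prep_output_alt output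
instance (output : String) (out : String) : Decidable (Spec_prep_output output out) := by
  unfold Spec_prep_output; infer_instance

-- ===== CLAIM (what is proved, stated in full; the proofs are below) =====
def Claim_equal_prep_output : Prop := ∀ (output : String), Dom_prep_output output → Pre_prep_output output → Spec_prep_output output (prep_output output)

-- ===== LEMMAS AND PROOFS =====

-- Proof-side bridge: the per-word "capitalize after a terminator" pass both pipelines amount to.
def pvBpass : Bool → List (List Char) → List (List Char)
  | _, [] => []
  | cap, w :: ws =>
    let w2 := if cap then pyCapitalize w else w
    w2 :: pvBpass (pvLastIn w2 ['.', '!', '?']) ws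

-- B's grouping fold, as a recursive function.
def grpGo (cur : List (List Char)) : List (List Char) → List (List (List Char))
  | [] => if cur.isEmpty then [] else [cur]
  | w :: ws =>
    if pvLastIn w ['.', '!', '?'] then (cur ++ [w]) :: grpGo [] ws else grpGo (cur ++ [w]) ws

theorem pvGrpFold (ws : List (List Char)) :
    ∀ (sents : List (List (List Char))) (cur : List (List Char)),
    (if (ws.foldl
        (fun (st : List (List (List Char)) × List (List Char)) w =>
          let cur := st.2 ++ [w]
          if pvLastIn w ['.', '!', '?'] then (st.1 ++ [cur], []) else (st.1, cur))
        (sents, cur)).2.isEmpty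
      then (ws.foldl
        (fun (st : List (List (List Char)) × List (List Char)) w =>
          let cur := st.2 ++ [w]
          if pvLastIn w ['.', '!', '?'] then (st.1 ++ [cur], []) else (st.1, cur))
        (sents, cur)).1
      else (ws.foldl
        (fun (st : List (List (List Char)) × List (List Char)) w =>
          let cur := st.2 ++ [w]
          if pvLastIn w ['.', '!', '?'] then (st.1 ++ [cur], []) else (st.1, cur))
        (sents, cur)).1 ++ [(ws.foldl
        (fun (st : List (List (List Char)) × List (List Char)) w =>
          let cur := st.2 ++ [w]
          if pvLastIn w ['.', '!', '?'] then (st.1 ++ [cur], []) else (st.1, cur))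
        (sents, cur)).2])
    = sents ++ grpGo cur ws := by
  induction ws with
  | nil =>
    intro sents cur
    simp only [List.foldl_nil, grpGo]
    cases cur.isEmpty <;> simp
  | cons w ws ih =>
    intro sents cur
    simp only [List.foldl_cons, grpGo]
    by_cases hterm : pvLastIn w ['.', '!', '?'] = true
    · simp only [hterm, if_pos]
      rw [ih (sents ++ [cur ++ [w]]) []]
      simp
    · simp only [hterm, Bool.false_eq_true, ite_false]
      rw [ih sents (cur ++ [w])]

theorem pvGetNegOne {α : Type} (l : List α) (h : l ≠ []) :
    PySem.List.pyGet? l (-1) = l.getLast? := by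
  have hn : 0 < l.length := List.length_pos_iff.mpr h
  simp only [PySem.List.pyGet?, PySem.List.pyIdx?]
  rw [if_neg (by omega), if_pos (by omega)]
  simp [List.getLast?_eq_getElem?]

theorem pvPunctLower (c : Char) :
    (['.', '!', '?'].contains (PySem.Chars.lowerChar c)) = (['.', '!', '?'].contains c) := by
  unfold PySem.Chars.lowerChar
  split
  · rename_i hl
    unfold PySem.Chars.isupper at hl
    simp at hl
    obtain ⟨h1, h2⟩ := hl
    have h1' : 65 ≤ c.toNat := h1
    have h2' : c.toNat ≤ 90 := h2
    have ht : (Char.ofNat (c.toNat + 32)).toNat = c.toNat + 32 := by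
      rw [Char.ofNat, dif_pos (by constructor; omega)]
      rfl
    have hfv : ∀ (d : Char) (p : Char), d.toNat ≠ p.toNat → (d == p) = false := by
      intro d p hne
      rw [beq_eq_false_iff_ne]
      intro h; subst h; exact hne rfl
    have h46 : ('.' : Char).toNat = 46 := by decide
    have h33 : ('!' : Char).toNat = 33 := by decide
    have h63 : ('?' : Char).toNat = 63 := by decide
    simp only [List.contains_cons, List.contains_nil, Bool.or_false]
    rw [hfv _ _ (by rw [ht, h46]; omega), hfv _ _ (by rw [ht, h33]; omega),
      hfv _ _ (by rw [ht, h63]; omega), hfv _ _ (by rw [h46]; omega),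
      hfv _ _ (by rw [h33]; omega), hfv _ _ (by rw [h63]; omega)]
  · rfl

theorem pvPunctUpper (c : Char) :
    (['.', '!', '?'].contains (PySem.Chars.upperChar c)) = (['.', '!', '?'].contains c) := by
  unfold PySem.Chars.upperChar
  split
  · rename_i hl
    unfold PySem.Chars.islower at hl
    simp at hl
    obtain ⟨h1, h2⟩ := hl
    have h1' : 97 ≤ c.toNat := h1
    have h2' : c.toNat ≤ 122 := h2
    have ht : (Char.ofNat (c.toNat - 32)).toNat = c.toNat - 32 := by
      rw [Char.ofNat, dif_pos (by constructor; omega)]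
      rfl
    have hfv : ∀ (d : Char) (p : Char), d.toNat ≠ p.toNat → (d == p) = false := by
      intro d p hne
      rw [beq_eq_false_iff_ne]
      intro h; subst h; exact hne rfl
    have h46 : ('.' : Char).toNat = 46 := by decide
    have h33 : ('!' : Char).toNat = 33 := by decide
    have h63 : ('?' : Char).toNat = 63 := by decide
    simp only [List.contains_cons, List.contains_nil, Bool.or_false]
    rw [hfv _ _ (by rw [ht, h46]; omega), hfv _ _ (by rw [ht, h33]; omega),
      hfv _ _ (by rw [ht, h63]; omega), hfv _ _ (by rw [h46]; omega),
      hfv _ _ (by rw [h33]; omega), hfv _ _ (by rw [h63]; omega)]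
  · rfl

-- capitalize never changes whether the last character is a terminator
theorem pvLastIn_cap (w : List Char) (h : w ≠ []) :
    pvLastIn (pyCapitalize w) ['.', '!', '?'] = pvLastIn w ['.', '!', '?'] := by
  cases w with
  | nil => simp at h
  | cons c rest =>
    cases rest with
    | nil =>
      simp only [pyCapitalize, PySem.Chars.lower, List.map_nil, pvLastIn]
      rw [pvGetNegOne _ (by simp), pvGetNegOne _ (by simp)]
      simp only [List.getLast?_singleton]
      exact pvPunctUpper c
    | cons r rs =>
      simp only [pyCapitalize, PySem.Chars.lower, pvLastIn]
      rw [pvGetNegOne _ (by simp), pvGetNegOne _ (by simp)]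
      rw [List.map_cons, List.getLast?_cons_cons, List.getLast?_cons_cons,
        ← List.map_cons, List.getLast?_map]
      cases hl : (r :: rs).getLast? with
      | none => simp at hl
      | some d =>
        simp only [Option.map_some]
        exact pvPunctLower d

-- flatten-of-capitalized-groups equals the per-word pass
theorem pvFlatGrp (ws : List (List Char)) (h : ∀ w ∈ ws, w ≠ []) :
    ∀ cur : List (List Char),
    ((grpGo cur ws).map capFirstSent).flatMap id
      = (if cur.isEmpty then pvBpass true ws else capFirstSent cur ++ pvBpass false ws) := by
  induction ws with
  | nil =>
    intro cur
    cases hc : cur.isEmpty <;> simp [grpGo, pvBpass, hc]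
  | cons w ws ih =>
    intro cur
    have hwne : w ≠ [] := h w (by simp)
    have ih' := ih (fun u hu => h u (by simp [hu]))
    by_cases hterm : pvLastIn w ['.', '!', '?'] = true
    · simp only [grpGo, hterm, if_pos, List.map_cons, List.flatMap_cons, id]
      rw [ih' []]
      simp only [List.isEmpty_nil, if_pos]
      cases cur with
      | nil =>
        simp only [List.isEmpty_nil, if_pos, List.nil_append, capFirstSent, pvBpass,
          if_pos, pvLastIn_cap w hwne, hterm]
        simp
      | cons d ds =>
        simp only [List.isEmpty_cons, Bool.false_eq_true, if_neg, ite_false,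
          List.cons_append, capFirstSent, pvBpass, Bool.false_eq_true, ite_false, hterm, if_pos]
        simp
    · have hterm' : pvLastIn w ['.', '!', '?'] = false := by simpa using hterm
      simp only [grpGo, hterm', Bool.false_eq_true, ite_false]
      rw [ih' (cur ++ [w])]
      cases cur with
      | nil =>
        simp only [List.nil_append, List.isEmpty_cons, Bool.false_eq_true, ite_false,
          List.isEmpty_nil, if_pos, capFirstSent, pvBpass, pvLastIn_cap w hwne, hterm']
        simp
      | cons d ds =>
        simp only [List.cons_append, List.isEmpty_cons, Bool.false_eq_true, ite_false,
          capFirstSent, pvBpass, hterm']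
        simp

theorem pvSetAppend {α : Type} (pre : List α) (w v : α) (ws : List α) :
    (pre ++ w :: ws).set pre.length v = pre ++ v :: ws := by
  induction pre with
  | nil => simp
  | cons x t ih => simp [List.set_cons_succ, ih]

theorem pvGetDAppendLast {α : Type} (pre ws : List α) (hp : pre ≠ []) (d : α) :
    (pre ++ ws).getD (pre.length - 1) d = pre.getLastD d := by
  have h1 : pre.length - 1 < pre.length := by
    cases pre with | nil => simp at hp | cons x t => simp
  rw [List.getD_eq_getElem?_getD, List.getElem?_append_left h1,
    ← List.getLast?_eq_getElem?]
  cases pre with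
  | nil => simp at hp
  | cons x t => simp [List.getLastD_eq_getLast?]

-- A's in-place indexed loop, related to the per-word pass.
theorem pvAloop (post : List (List Char)) : ∀ (pre : List (List Char)), pre ≠ [] →
    ((PySem.List.pyRange (pre.length : Int) ((pre.length : Int) + (post.length : Int)) 1).foldl
      (fun acc index =>
        if index ≠ 0 then
          if pvLastIn (PySem.List.pyGetD acc (index - 1) []) ['.', '!', '?'] then
            PySem.List.pySetD acc index (pyCapitalize (PySem.List.pyGetD acc index []))
          else acc
        else acc) (pre ++ post))
    = pre ++ pvBpass (pvLastIn (pre.getLastD []) ['.', '!', '?']) post := by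
  induction post with
  | nil =>
    intro pre hpre
    simp only [List.length_nil, Nat.cast_zero, add_zero, List.append_nil]
    rw [PySem.List.pyRange_one_eq_nil (le_refl _)]
    simp [pvBpass]
  | cons w ws ih =>
    intro pre hpre
    have hlen1 : 1 ≤ pre.length := by
      cases pre with | nil => simp at hpre | cons x t => simp
    have hcons : PySem.List.pyRange (pre.length : Int) ((pre.length : Int) + ((w :: ws).length : Int)) 1
        = (pre.length : Int) :: PySem.List.pyRange ((pre.length : Int) + 1) ((pre.length : Int) + ((w :: ws).length : Int)) 1 := by
      apply PySem.List.pyRange_one_cons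
      simp only [List.length_cons]
      push_cast
      omega
    rw [hcons, List.foldl_cons]
    have hne0 : ((pre.length : Int) ≠ 0) := by
      simp; omega
    rw [if_pos hne0]
    have hidx : ((pre.length : Int) - 1) = ((pre.length - 1 : Nat) : Int) := by
      push_cast [hlen1]; ring
    have hprev : PySem.List.pyGetD (pre ++ w :: ws) ((pre.length : Int) - 1) [] = pre.getLastD [] := by
      rw [hidx, PySem.List.pyGetD_natCast]
      exact pvGetDAppendLast pre (w :: ws) hpre []
    have hcur : PySem.List.pyGetD (pre ++ w :: ws) ((pre.length : Int)) [] = w := by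
      rw [PySem.List.pyGetD_natCast, List.getD_eq_getElem?_getD,
        List.getElem?_append_right (le_refl _)]
      simp
    rw [hprev, hcur]
    by_cases hflag : pvLastIn (pre.getLastD []) ['.', '!', '?'] = true
    · rw [if_pos hflag]
      rw [PySem.List.pySetD_natCast, pvSetAppend]
      rw [show pre ++ pyCapitalize w :: ws = (pre ++ [pyCapitalize w]) ++ ws by simp]
      have harg : ((pre.length : Int) + 1) = (((pre ++ [pyCapitalize w]).length : Int)) := by
        simp
      have harg2 : ((pre.length : Int) + ((w :: ws).length : Int))
          = (((pre ++ [pyCapitalize w]).length : Int) + (ws.length : Int)) := by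
        simp; ring
      rw [harg, harg2, ih (pre ++ [pyCapitalize w]) (by simp)]
      rw [List.getLastD_concat]
      simp only [pvBpass, hflag, if_pos]
      simp [List.append_assoc]
    · rw [if_neg hflag]
      rw [show pre ++ w :: ws = (pre ++ [w]) ++ ws by simp]
      have harg : ((pre.length : Int) + 1) = (((pre ++ [w]).length : Int)) := by
        simp
      have harg2 : ((pre.length : Int) + ((w :: ws).length : Int))
          = (((pre ++ [w]).length : Int) + (ws.length : Int)) := by
        simp; ring
      rw [harg, harg2, ih (pre ++ [w]) (by simp)]
      rw [List.getLastD_concat]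
      have hflag' : pvLastIn (pre.getLastD []) ['.', '!', '?'] = false := by
        simpa using hflag
      simp only [pvBpass, hflag', Bool.false_eq_true, ↓reduceIte]
      simp [List.append_assoc]

-- words produced by str.split() are nonempty and contain no whitespace
theorem pvSplitGoProps (s : List Char) : ∀ (cur : List Char) (acc : List (List Char)),
    (∀ c ∈ cur, PySem.Chars.isspace c = false) →
    (∀ w ∈ acc, w ≠ [] ∧ ∀ c ∈ w, PySem.Chars.isspace c = false) →
    ∀ w ∈ PySem.Chars.split₀.go s cur acc, w ≠ [] ∧ ∀ c ∈ w, PySem.Chars.isspace c = false := by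
  induction s with
  | nil =>
    intro cur acc hcur hacc w hw
    unfold PySem.Chars.split₀.go at hw
    split at hw
    · exact hacc w (by simpa using hw)
    · rename_i hne
      simp at hw
      rcases hw with h | h
      · exact hacc w h
      · subst h
        refine ⟨by simpa using hne, ?_⟩
        intro c hc; exact hcur c (by simpa using hc)
  | cons c rest ih =>
    intro cur acc hcur hacc w hw
    unfold PySem.Chars.split₀.go at hw
    by_cases hsp : PySem.Chars.isspace c = true
    · rw [if_pos hsp] at hw
      split at hw
      · exact ih [] acc (by simp) hacc w hw
      · rename_i hne
        refine ih [] _ (by simp) ?_ w hw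
        intro u hu
        simp at hu
        rcases hu with h | h
        · subst h
          refine ⟨by simpa using hne, ?_⟩
          intro d hd; exact hcur d (by simpa using hd)
        · exact hacc u h
    · rw [if_neg hsp] at hw
      refine ih (c :: cur) acc ?_ hacc w hw
      intro d hd
      rcases List.mem_cons.mp hd with h | h
      · subst h; simpa using hsp
      · exact hcur d h

theorem pvSplitProps (s : List Char) :
    ∀ w ∈ PySem.Chars.split₀ s, w ≠ [] ∧ ∀ c ∈ w, PySem.Chars.isspace c = false := by
  unfold PySem.Chars.split₀
  exact pvSplitGoProps s [] [] (by simp) (by simp)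

theorem pvSplitGoNe (s : List Char) : ∀ (cur : List Char) (acc : List (List Char)),
    ((∃ c ∈ s, PySem.Chars.isspace c = false) ∨ cur ≠ [] ∨ acc ≠ []) →
    PySem.Chars.split₀.go s cur acc ≠ [] := by
  induction s with
  | nil =>
    intro cur acc h
    unfold PySem.Chars.split₀.go
    split
    · rename_i he
      have hc : cur = [] := by simpa [List.isEmpty_iff] using he
      rcases h with ⟨c, hc', _⟩ | h | h
      · simp at hc'
      · exact absurd hc h
      · simpa using h
    · simp
  | cons c rest ih =>
    intro cur acc h
    unfold PySem.Chars.split₀.go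
    by_cases hsp : PySem.Chars.isspace c = true
    · rw [if_pos hsp]
      split
      · rename_i he
        have hc : cur = [] := by simpa [List.isEmpty_iff] using he
        apply ih
        rcases h with ⟨d, hd, hns⟩ | h | h
        · rcases List.mem_cons.mp hd with rfl | hd'
          · rw [hsp] at hns; simp at hns
          · exact Or.inl ⟨d, hd', hns⟩
        · exact absurd hc h
        · exact Or.inr (Or.inr h)
      · exact ih [] _ (Or.inr (Or.inr (by simp)))
    · rw [if_neg hsp]
      exact ih (c :: cur) acc (Or.inr (Or.inl (by simp)))

theorem pvSplitNeNil (s : List Char) (h : ∃ c ∈ s, PySem.Chars.isspace c = false) :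
    PySem.Chars.split₀ s ≠ [] := by
  unfold PySem.Chars.split₀
  exact pvSplitGoNe s [] [] (Or.inl h)

theorem pvReplaceGoKeeps : ∀ (fuel : Nat) (l acc : List Char),
    ((∃ c ∈ acc, PySem.Chars.isspace c = false) ∨ (∃ c ∈ l, PySem.Chars.isspace c = false)) →
    ∃ c ∈ PySem.Chars.replace.go [' ', '.'] ['.'] fuel l acc, PySem.Chars.isspace c = false := by
  intro fuel
  induction fuel with
  | zero =>
    intro l acc h
    unfold PySem.Chars.replace.go
    rcases h with ⟨c, hc, hns⟩ | ⟨c, hc, hns⟩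
    · exact ⟨c, by simp [hc], hns⟩
    · exact ⟨c, by simp [hc], hns⟩
  | succ fuel ih =>
    intro l acc h
    match l with
    | [] =>
      unfold PySem.Chars.replace.go
      rcases h with ⟨c, hc, hns⟩ | ⟨c, hc, hns⟩
      · exact ⟨c, by simp [hc], hns⟩
      · simp at hc
    | c :: t =>
      unfold PySem.Chars.replace.go
      split
      · exact ih _ _ (Or.inl ⟨'.', by simp, by decide⟩)
      · apply ih
        rcases h with ⟨d, hd, hns⟩ | ⟨d, hd, hns⟩
        · exact Or.inl ⟨d, by simp [hd], hns⟩
        · rcases List.mem_cons.mp hd with rfl | hd'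
          · exact Or.inl ⟨d, by simp, hns⟩
          · exact Or.inr ⟨d, hd', hns⟩

theorem pvReplaceKeeps (s : List Char) (h : ∃ c ∈ s, PySem.Chars.isspace c = false) :
    ∃ c ∈ PySem.Chars.replace s [' ', '.'] ['.'], PySem.Chars.isspace c = false := by
  unfold PySem.Chars.replace
  rw [if_neg (by simp)]
  exact pvReplaceGoKeeps s.length s [] (Or.inr h)

theorem pvStripKeeps (s : List Char) (h : ∃ c ∈ s, PySem.Chars.isspace c = false) :
    ∃ c ∈ PySem.Chars.strip s, PySem.Chars.isspace c = false := by
  obtain ⟨c, hc, hns⟩ := h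
  unfold PySem.Chars.strip PySem.Chars.lstrip PySem.Chars.rstrip
  have h1 : c ∈ List.dropWhile PySem.Chars.isspace s := by
    rcases List.mem_append.mp (by rw [List.takeWhile_append_dropWhile (p := PySem.Chars.isspace)]; exact hc) with h | h
    · exact absurd (List.mem_takeWhile_imp h) (by simp [hns])
    · exact h
  have h2 : c ∈ List.dropWhile PySem.Chars.isspace (List.dropWhile PySem.Chars.isspace s).reverse := by
    have hc2 : c ∈ (List.dropWhile PySem.Chars.isspace s).reverse := by simpa using h1
    rcases List.mem_append.mp (by rw [List.takeWhile_append_dropWhile (p := PySem.Chars.isspace)]; exact hc2) with h | h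
    · exact absurd (List.mem_takeWhile_imp h) (by simp [hns])
    · exact h
  exact ⟨c, by simpa using h2, hns⟩

theorem isspace_upperChar (c : Char) (h : PySem.Chars.isspace c = false) :
    PySem.Chars.isspace (PySem.Chars.upperChar c) = false := by
  unfold PySem.Chars.upperChar
  split
  · rename_i hl
    unfold PySem.Chars.islower at hl
    simp at hl
    obtain ⟨h1, h2⟩ := hl
    have h1' : 97 ≤ c.toNat := h1
    have h2' : c.toNat ≤ 122 := h2
    have ht : (Char.ofNat (c.toNat - 32)).toNat = c.toNat - 32 := by
      rw [Char.ofNat, dif_pos (by constructor; omega)]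
      rfl
    unfold PySem.Chars.isspace
    simp [ht]
    omega
  · exact h

theorem isspace_lowerChar (c : Char) (h : PySem.Chars.isspace c = false) :
    PySem.Chars.isspace (PySem.Chars.lowerChar c) = false := by
  unfold PySem.Chars.lowerChar
  split
  · rename_i hl
    unfold PySem.Chars.isupper at hl
    simp at hl
    obtain ⟨h1, h2⟩ := hl
    have h1' : 65 ≤ c.toNat := h1
    have h2' : c.toNat ≤ 90 := h2
    have ht : (Char.ofNat (c.toNat + 32)).toNat = c.toNat + 32 := by
      rw [Char.ofNat, dif_pos (by constructor; omega)]
      rfl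
    unfold PySem.Chars.isspace
    simp [ht]
    omega
  · exact h

theorem pvCapProps (w : List Char) (h1 : w ≠ []) (h2 : ∀ c ∈ w, PySem.Chars.isspace c = false) :
    pyCapitalize w ≠ [] ∧ ∀ c ∈ pyCapitalize w, PySem.Chars.isspace c = false := by
  cases w with
  | nil => simp at h1
  | cons c rest =>
    refine ⟨by simp [pyCapitalize], ?_⟩
    intro d hd
    simp only [pyCapitalize] at hd
    rcases List.mem_cons.mp hd with rfl | hd'
    · exact isspace_upperChar c (h2 c (by simp))
    · obtain ⟨e, he, rfl⟩ := List.mem_map.mp (by simpa [PySem.Chars.lower] using hd')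
      exact isspace_lowerChar e (h2 e (by simp [he]))

theorem pvBpassProps (ws : List (List Char))
    (h : ∀ w ∈ ws, w ≠ [] ∧ ∀ c ∈ w, PySem.Chars.isspace c = false) :
    ∀ cap, ∀ w ∈ pvBpass cap ws, w ≠ [] ∧ ∀ c ∈ w, PySem.Chars.isspace c = false := by
  induction ws with
  | nil => intro cap w hw; simp [pvBpass] at hw
  | cons x t ih =>
    intro cap w hw
    simp only [pvBpass] at hw
    rcases List.mem_cons.mp hw with rfl | hw'
    · cases cap with
      | true => simpa using pvCapProps x (h x (by simp)).1 (h x (by simp)).2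
      | false => simpa using h x (by simp)
    · exact ih (fun u hu => h u (by simp [hu])) _ w hw'

theorem pvJoinHead (w : List Char) (ws : List (List Char)) :
    ∃ t, PySem.Chars.join [' '] (w :: ws) = w ++ t := by
  cases ws with
  | nil => exact ⟨[], by simp [PySem.Chars.join_singleton]⟩
  | cons x t => exact ⟨[' '] ++ PySem.Chars.join [' '] (x :: t),
      by simp [PySem.Chars.join_cons_cons]⟩

theorem pvJoinNeNil (w : List Char) (ws : List (List Char)) (h : w ≠ []) :
    PySem.Chars.join [' '] (w :: ws) ≠ [] := by
  obtain ⟨t, ht⟩ := pvJoinHead w ws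
  rw [ht]
  simp [h]

theorem pvJoinLast (ws : List (List Char)) (hne : ws ≠ []) (hw : ∀ u ∈ ws, u ≠ []) :
    ∃ u ∈ ws, (PySem.Chars.join [' '] ws).getLast? = u.getLast? := by
  induction ws with
  | nil => simp at hne
  | cons w t ih =>
    cases t with
    | nil => exact ⟨w, by simp, by rw [PySem.Chars.join_singleton]⟩
    | cons x r =>
      obtain ⟨u, hu, he⟩ := ih (by simp) (fun u hu => hw u (by simp [hu]))
      have hxr : PySem.Chars.join [' '] (x :: r) ≠ [] := pvJoinNeNil x r (hw x (by simp))
      refine ⟨u, by simp [hu], ?_⟩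
      rw [PySem.Chars.join_cons_cons, List.append_assoc,
        List.getLast?_append_of_ne_nil _ (by simp),
        List.getLast?_append_of_ne_nil _ hxr, he]

theorem pvFlatEq (w : List Char) (ws : List (List Char)) :
    (w :: ws).flatMap (· ++ [' ']) = PySem.Chars.join [' '] (w :: ws) ++ [' '] := by
  induction ws generalizing w with
  | nil => simp [PySem.Chars.join_singleton]
  | cons x t ih =>
    rw [PySem.Chars.join_cons_cons]
    simp only [List.flatMap_cons] at ih ⊢
    rw [ih x]
    simp [List.append_assoc]

theorem pvStripJoin (ws : List (List Char)) (hne : ws ≠ [])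
    (h : ∀ w ∈ ws, w ≠ [] ∧ ∀ c ∈ w, PySem.Chars.isspace c = false) :
    PySem.Chars.strip (ws.foldl (fun s w => s ++ w ++ [' ']) [])
    = PySem.Chars.join [' '] ws := by
  obtain ⟨w, t, rfl⟩ : ∃ w t, ws = w :: t := by
    cases ws with
    | nil => simp at hne
    | cons w t => exact ⟨w, t, rfl⟩
  have hfold : (w :: t).foldl (fun s u => s ++ u ++ [' ']) []
      = PySem.Chars.join [' '] (w :: t) ++ [' '] := by
    have := PySem.List.foldl_append_eq_flatMap (fun u => u ++ [' ']) (w :: t) []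
    simp only [List.append_assoc] at this ⊢
    rw [this, pvFlatEq w t]
    simp
  rw [hfold]
  have hwne : w ≠ [] := (h w (by simp)).1
  obtain ⟨c, w', rfl⟩ : ∃ c w', w = c :: w' := by
    cases w with
    | nil => simp at hwne
    | cons c w' => exact ⟨c, w', rfl⟩
  have hcns : PySem.Chars.isspace c = false := (h (c :: w') (by simp)).2 c (by simp)
  obtain ⟨tt, htt⟩ := pvJoinHead (c :: w') t
  have hlstrip : PySem.Chars.lstrip (PySem.Chars.join [' '] ((c :: w') :: t) ++ [' '])
      = PySem.Chars.join [' '] ((c :: w') :: t) ++ [' '] := by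
    rw [htt]
    simp [PySem.Chars.lstrip, hcns]
  obtain ⟨u, hu, hlast⟩ := pvJoinLast ((c :: w') :: t) (by simp) (fun u hu => (h u hu).1)
  have hune : u ≠ [] := (h u hu).1
  obtain ⟨d, hd⟩ : ∃ d, u.getLast? = some d := ⟨u.getLast hune, List.getLast?_eq_some_getLast hune⟩
  have hdns : PySem.Chars.isspace d = false :=
    (h u hu).2 d (List.mem_of_getLast? hd)
  have hrev : (PySem.Chars.join [' '] ((c :: w') :: t)).reverse.head? = some d := by
    rw [List.head?_reverse, hlast, hd]
  obtain ⟨rt, hrt⟩ : ∃ rt, (PySem.Chars.join [' '] ((c :: w') :: t)).reverse = d :: rt := by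
    cases hr : (PySem.Chars.join [' '] ((c :: w') :: t)).reverse with
    | nil => rw [hr] at hrev; simp at hrev
    | cons e rt =>
      rw [hr] at hrev
      simp at hrev
      exact ⟨rt, by rw [hrev]⟩
  unfold PySem.Chars.strip
  rw [hlstrip]
  unfold PySem.Chars.rstrip
  rw [List.reverse_append]
  simp only [List.reverse_singleton, List.singleton_append]
  rw [List.dropWhile_cons]
  simp only [show PySem.Chars.isspace ' ' = true from by decide, if_true]
  rw [hrt, List.dropWhile_cons]
  simp [hdns, ← hrt]

-- ===== VERDICT (by name: the statement is the Claim_ definition above) =====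
theorem prep_output_spec : Claim_equal_prep_output := by
  intro output hdom hpre
  unfold Spec_prep_output
  have hkeep : ∃ c ∈ PySem.Chars.replace (PySem.Chars.strip output.toList) [' ', '.'] ['.'],
      PySem.Chars.isspace c = false :=
    pvReplaceKeeps _ (pvStripKeeps _ (by
      obtain ⟨c, hc, hns⟩ := List.any_eq_true.mp hpre
      exact ⟨c, hc, by simpa using hns⟩))
  obtain ⟨w0, ws, hw⟩ : ∃ w0 ws,
      PySem.Chars.split₀ (PySem.Chars.replace (PySem.Chars.strip output.toList) [' ', '.'] ['.'])
        = w0 :: ws := by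
    cases hs : PySem.Chars.split₀ (PySem.Chars.replace (PySem.Chars.strip output.toList) [' ', '.'] ['.']) with
    | nil => exact absurd hs (pvSplitNeNil _ hkeep)
    | cons w0 ws => exact ⟨w0, ws, rfl⟩
  have hprops : ∀ w ∈ w0 :: ws, w ≠ [] ∧ ∀ c ∈ w, PySem.Chars.isspace c = false := by
    rw [← hw]; exact pvSplitProps _
  -- A's loop result equals the per-word pass
  have hA : (PySem.List.pyRange 0 (PySem.List.len (pyCapitalize w0 :: ws)) 1).foldl
      (fun acc index =>
        if index ≠ 0 then
          if pvLastIn (PySem.List.pyGetD acc (index - 1) []) ['.', '!', '?'] then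
            PySem.List.pySetD acc index (pyCapitalize (PySem.List.pyGetD acc index []))
          else acc
        else acc) (pyCapitalize w0 :: ws)
      = pvBpass true (w0 :: ws) := by
    rw [PySem.List.len_eq]
    rw [show (((pyCapitalize w0 :: ws)).length : Int) = 1 + (ws.length : Int) by
      simp only [List.length_cons]; push_cast; ring]
    rw [PySem.List.pyRange_one_cons (by omega), List.foldl_cons]
    simp only [ne_eq, not_true_eq_false, if_false, zero_add]
    have hmain := pvAloop ws [pyCapitalize w0] (by simp)
    simp only [List.length_cons, List.length_nil, Nat.cast_one, List.singleton_append,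
      List.getLastD, zero_add] at hmain
    rw [hmain]
    simp [pvBpass]
  -- B's grouped pipeline flattens to the same per-word pass
  have hgrp := pvGrpFold (w0 :: ws) [] []
  simp only [List.nil_append] at hgrp
  have hB : ((grpGo [] (w0 :: ws)).map capFirstSent).flatMap id = pvBpass true (w0 :: ws) := by
    rw [pvFlatGrp (w0 :: ws) (fun u hu => (hprops u hu).1) []]
    simp
  -- strip of A's manual concatenation equals the join
  have hstrip : PySem.Chars.strip ((pvBpass true (w0 :: ws)).foldl (fun s w => s ++ w ++ [' ']) [])
      = PySem.Chars.join [' '] (pvBpass true (w0 :: ws)) := by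
    apply pvStripJoin
    · simp [pvBpass]
    · exact pvBpassProps _ hprops true
  simp only [prep_output, prep_output_alt, hw, hA, hgrp, hB, hstrip]
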